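-- pv_equiv track=rewrite | github.com/Ricco1010/ricco | src/ricco/util/strings.py | _is_seq
-- ===== SOURCE A (Python) =====
-- def _is_seq(_str):
--   """判断一个字符串是否全部是递增或递减1的数字组成的，如‘1234’、‘876’"""
--   # 初始化为递增或递减
--   diff_ls = [1, -1]
--   s0 = _str[0]
--   for s in _str[1:]:
--     _d = int(s) - int(s0)
--     if _d not in diff_ls:
--       return False
--     # 根据前面的字符再次确定递增或递减
--     diff_ls = [_d]
--     s0 = s
--   return True
-- ===== SOURCE B (Python) =====
-- def _is_seq(_str):
--   """判断一个字符串是否全部是递增或递减1的数字组成的，如'1234'、'876'"""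
--   pairs = list(zip(_str, _str[1:]))
--   return all(int(b) - int(a) == 1 for a, b in pairs) or \
--          all(int(b) - int(a) == -1 for a, b in pairs)
-- ===== Notes on version B (the rewrite author's own statement) =====
-- stated objective: simpler
-- what changed: Replaces A's stateful direction-locking loop (running allowed-diff list and previous character) with two short-circuiting global uniformity sweeps over the adjacent pairs: all diffs +1 or all diffs -1.
-- crash fix: On the empty string A raises IndexError (_str[0]); B returns True (an empty string is vacuously a consecutive run). — e.g. on _is_seq(""): A raises IndexError, B returns true
import Mathlib
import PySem

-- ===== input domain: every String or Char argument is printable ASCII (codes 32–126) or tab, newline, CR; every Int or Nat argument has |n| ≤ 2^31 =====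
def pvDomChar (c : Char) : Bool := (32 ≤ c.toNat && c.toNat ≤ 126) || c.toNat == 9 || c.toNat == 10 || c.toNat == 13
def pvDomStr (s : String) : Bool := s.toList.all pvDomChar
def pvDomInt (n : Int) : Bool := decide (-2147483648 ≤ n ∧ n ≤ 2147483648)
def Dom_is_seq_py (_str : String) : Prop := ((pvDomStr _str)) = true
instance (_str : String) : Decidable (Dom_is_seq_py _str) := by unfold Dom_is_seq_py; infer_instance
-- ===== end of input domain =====

-- ===== PORT A =====
-- A keeps a list of allowed diffs (initially [1,-1], then locked to the last diff)
-- and the previous character, bailing at the first disallowed diff.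
-- B instead checks global uniformity: all adjacent diffs are +1, or all are -1.
-- Header: B is simpler (two uniformity sweeps instead of a stateful direction-locking loop).

-- int(c) for a one-character string; the .getD 0 arm is int()'s ValueError, excluded by Pre_
def pvInt1 (c : Char) : Int := (PySem.Int.ofStr? (String.ofList [c])).getD 0

-- the for-loop of A: state = (diff_ls, s0), over the remaining characters
def isSeqLoopA (diff_ls : List Int) (s0 : Char) (rest : List Char) : Bool :=
  match rest with
  | [] => true
  | s :: tl =>
    let _d : Int := pvInt1 s - pvInt1 s0
    if _d ∈ diff_ls then isSeqLoopA [_d] s tl else false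

def is_seq_py (_str : String) : Bool :=
  match PySem.Str.pyGet? _str 0 with          -- s0 = _str[0]; none = IndexError, excluded by Pre_
  | none => false
  | some s0 => isSeqLoopA [1, -1] s0 (_str.toList.drop 1)   -- for s in _str[1:]

-- ===== PORT B =====
def is_seq_py_alt (_str : String) : Bool :=
  let l := _str.toList
  let pairs := l.zip (l.drop 1)               -- zip(_str, _str[1:])
  pairs.all (fun p => pvInt1 p.2 - pvInt1 p.1 == 1) ||
  pairs.all (fun p => pvInt1 p.2 - pvInt1 p.1 == -1)

-- ===== PRECONDITION & SPEC =====
-- Pre_: exactly the inputs on which A returns: nonempty, and either a single character,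
-- or all characters are digits, or the digit prefix itself already breaks the
-- uniform +1/-1 rule (so A returns False before reaching the first non-digit).
def Pre_is_seq_py (_str : String) : Prop :=
  _str.toList ≠ [] ∧
  (_str.toList.length = 1 ∨
    (let p := _str.toList.takeWhile Char.isDigit
     p.length = _str.toList.length ∨
      ¬ ((p.zip (p.drop 1)).all (fun q => pvInt1 q.2 - pvInt1 q.1 == 1) = true ∨
         (p.zip (p.drop 1)).all (fun q => pvInt1 q.2 - pvInt1 q.1 == -1) = true)))
instance (_str : String) : Decidable (Pre_is_seq_py _str) := by unfold Pre_is_seq_py; infer_instance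
def pvWitness_is_seq_py : String := "1234"

-- On the empty string A raises IndexError (_str[0]); B returns True (vacuously consecutive).
def Raises_is_seq_py (_str : String) : Prop := _str = ""
instance (_str : String) : Decidable (Raises_is_seq_py _str) := by unfold Raises_is_seq_py; infer_instance
def pvRaiseWitness_is_seq_py : String := ""
def pvRaiseWitnessOut_is_seq_py : Bool := true

def Spec_is_seq_py (_str : String) (out : Bool) : Prop := out = is_seq_py_alt _str
instance (_str : String) (out : Bool) : Decidable (Spec_is_seq_py _str out) := by unfold Spec_is_seq_py; infer_instance

-- ===== CLAIM (what is proved, stated in full; the proofs are below) =====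
def Claim_equal_is_seq_py : Prop := ∀ (_str : String), Dom_is_seq_py _str → Pre_is_seq_py _str → Spec_is_seq_py _str (is_seq_py _str)
def Claim_raises_is_seq_py : Prop := (∀ (_str : String), Dom_is_seq_py _str → Raises_is_seq_py _str → ¬ Pre_is_seq_py _str) ∧ (Dom_is_seq_py (pvRaiseWitness_is_seq_py) ∧ Raises_is_seq_py (pvRaiseWitness_is_seq_py) ∧ is_seq_py_alt (pvRaiseWitness_is_seq_py) = pvRaiseWitnessOut_is_seq_py)

-- ===== LEMMAS AND PROOFS =====

-- once the direction is locked to e, A's loop is exactly a uniformity check of the remaining diffs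
theorem isSeqLoopA_locked (l : List Char) (c : Char) (e : Int) :
    isSeqLoopA [e] c l = ((c :: l).zip l).all (fun p => pvInt1 p.2 - pvInt1 p.1 == e) := by
  induction l generalizing c with
  | nil => rfl
  | cons x tl ih =>
    simp only [isSeqLoopA, List.zip_cons_cons, List.all_cons, List.mem_singleton]
    by_cases h : pvInt1 x - pvInt1 c = e
    · simp [h, ih]
    · simp [h]

theorem isSeqLoopA_eq (c : Char) (l : List Char) :
    isSeqLoopA [1, -1] c l
      = (((c :: l).zip l).all (fun p => pvInt1 p.2 - pvInt1 p.1 == 1) ||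
         ((c :: l).zip l).all (fun p => pvInt1 p.2 - pvInt1 p.1 == -1)) := by
  cases l with
  | nil => rfl
  | cons x tl =>
    simp only [isSeqLoopA, List.zip_cons_cons, List.all_cons, List.mem_cons, List.not_mem_nil, or_false]
    by_cases h1 : pvInt1 x - pvInt1 c = 1
    · simp [h1, isSeqLoopA_locked]
    · by_cases h2 : pvInt1 x - pvInt1 c = -1
      · simp [h2, isSeqLoopA_locked]
      · simp [h1, h2]

-- ===== VERDICT (by name: the statement is the Claim_ definition above) =====
theorem is_seq_py_spec : Claim_equal_is_seq_py := by
  intro s _dom pre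
  unfold Spec_is_seq_py is_seq_py is_seq_py_alt
  obtain ⟨hne, -⟩ := pre
  cases hl : s.toList with
  | nil => exact absurd hl hne
  | cons c tl =>
    have hget : PySem.Str.pyGet? s 0 = some c := by
      simp [PySem.Str.pyGet?, PySem.List.pyGet?, PySem.List.pyIdx?, hl]
    simp [hl, isSeqLoopA_eq]

@[simp]
theorem is_seq_py_raises : Claim_raises_is_seq_py := by
  unfold Claim_raises_is_seq_py
  refine ⟨?_, by decide⟩
  intro s _dom hr
  subst hr
  intro ⟨h, _⟩
  exact h rfl
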